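-- pv_equiv track=rewrite | github.com/therealharish/Problem-Solving | infyTQ/reversewords.py | encrypt_sentence
-- ===== SOURCE A (Python) =====
-- def encrypt_sentence(sentence):
--     l = sentence.split(" ")
--     s=""
--     for i in range(len(l)):
--       word = str(l[i])
--       if(i%2==0):
--         s+= word[::-1]+" "
--       else:
--         v=""
--         c=""
--         for j in word:
--           if (j in "aeiou"):
--             v+=j
--           else:
--             c+=j;
--         s+=c+v+" "
--     return s.strip()
-- ===== SOURCE B (Python) =====
-- def encrypt_sentence(sentence):
--     parts = []
--     for i, word in enumerate(sentence.split(" ")):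
--         if i % 2 == 0:
--             parts.append(word[::-1])
--         else:
--             parts.append("".join(sorted(word, key=lambda ch: ch in "aeiou")))
--     return " ".join(parts).strip()
-- ===== Notes on version B (the rewrite author's own statement) =====
-- stated objective: idiomatic
-- what changed: Replaces A's index loop with manual string concatenation and a two-accumulator vowel/consonant pass by enumerate over the split words, a stable sort on the Bool key (ch in 'aeiou') to put consonants before vowels, and ' '.join(parts).strip().
import Mathlib
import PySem

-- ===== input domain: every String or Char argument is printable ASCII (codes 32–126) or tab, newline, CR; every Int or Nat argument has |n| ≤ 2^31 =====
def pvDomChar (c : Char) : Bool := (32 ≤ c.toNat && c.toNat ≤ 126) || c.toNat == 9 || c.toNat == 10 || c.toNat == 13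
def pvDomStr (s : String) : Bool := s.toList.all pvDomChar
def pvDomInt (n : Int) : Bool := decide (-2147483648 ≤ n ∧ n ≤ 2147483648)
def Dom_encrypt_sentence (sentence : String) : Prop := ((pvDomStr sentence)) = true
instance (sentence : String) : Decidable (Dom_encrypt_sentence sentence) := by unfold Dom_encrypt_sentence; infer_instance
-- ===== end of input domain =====

-- B replaces A's per-word two-accumulator vowel/consonant pass and manual string concatenation
-- by a stable sort on a Bool key plus " ".join (objective: idiomatic; same output, return value only).

-- shared helper: Python's  ch in "aeiou"  (both A and B perform exactly this test)
def pvIsVowel (j : Char) : Bool := PySem.Chars.isIn [j] ['a', 'e', 'i', 'o', 'u']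

-- ===== PORT A =====
def encrypt_sentence (sentence : String) : String :=
  let l := PySem.Chars.splitOn sentence.toList [' ']
  let s : List Char :=
    (PySem.List.pyRange 0 (l.length : Int) 1).foldl (fun s i =>
      let word := PySem.List.pyGetD l i []
      if PySem.Int.mod i 2 == 0 then
        -- word[::-1]
        s ++ ((PySem.List.slice? word none none (-1)).getD []) ++ [' ']
      else
        let vc := word.foldl (fun (vc : List Char × List Char) j =>
          if pvIsVowel j then (vc.1 ++ [j], vc.2) else (vc.1, vc.2 ++ [j])) ([], [])
        s ++ vc.2 ++ vc.1 ++ [' ']) []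
  String.ofList (PySem.Chars.strip s)

-- ===== PORT B =====
def encrypt_sentence_alt (sentence : String) : String :=
  let parts :=
    (PySem.List.enumerate (PySem.Chars.splitOn sentence.toList [' '])).map (fun p =>
      if PySem.Int.mod p.1 2 == 0 then
        p.2.reverse
      else
        PySem.List.sorted p.2 (fun ch => pvIsVowel ch) false)
  String.ofList (PySem.Chars.strip (PySem.Chars.join [' '] parts))

-- ===== PRECONDITION & SPEC =====
def Spec_encrypt_sentence (sentence : String) (out : String) : Prop := out = encrypt_sentence_alt sentence
instance (sentence : String) (out : String) : Decidable (Spec_encrypt_sentence sentence out) := by unfold Spec_encrypt_sentence; infer_instance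

-- ===== CLAIM (what is proved, stated in full; the proofs are below) =====
def Claim_equal_encrypt_sentence : Prop := ∀ (sentence : String), Dom_encrypt_sentence sentence → Spec_encrypt_sentence sentence (encrypt_sentence sentence)

-- ===== LEMMAS AND PROOFS =====

-- inserting a key-false element into a (false-block ++ true-block) list puts it between the blocks
theorem pv_insertBy_false {α : Type} (key : α → Bool) (x : α) (hx : key x = false)
    (cs vs : List α) (hc : ∀ y ∈ cs, key y = false) (hv : ∀ y ∈ vs, key y = true) :
    PySem.List.insertBy (fun a b => decide (key a < key b)) x (cs ++ vs) = cs ++ x :: vs := by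
  induction cs with
  | nil =>
    cases vs with
    | nil => rfl
    | cons y ys =>
      have hy : key y = true := hv y (by simp)
      simp [PySem.List.insertBy, hx, hy]
  | cons z cs' ih =>
    have hz : key z = false := hc z (by simp)
    simp [PySem.List.insertBy, hx, hz, ih (fun y hy => hc y (by simp [hy]))]

-- inserting a key-true element into a (false-block ++ true-block) list appends it at the end
theorem pv_insertBy_true {α : Type} (key : α → Bool) (x : α) (hx : key x = true) (ys : List α) :
    PySem.List.insertBy (fun a b => decide (key a < key b)) x ys = ys ++ [x] := by
  apply PySem.List.insertBy_of_forall_not_before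
  intro y _
  simp [hx]

-- invariant of the insertion-sort fold for a Bool key
theorem pv_sorted_bool_aux {α : Type} (key : α → Bool) (xs : List α) :
    ∀ (cs vs : List α), (∀ y ∈ cs, key y = false) → (∀ y ∈ vs, key y = true) →
      xs.foldl (fun acc x => PySem.List.insertBy (fun a b => decide (key a < key b)) x acc) (cs ++ vs)
        = (cs ++ xs.filter (fun a => !key a)) ++ (vs ++ xs.filter (fun a => key a)) := by
  induction xs with
  | nil => intro cs vs _ _; simp
  | cons x xs' ih =>
    intro cs vs hc hv
    by_cases hx : key x = true
    · simp only [List.foldl_cons, pv_insertBy_true key x hx (cs ++ vs)]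
      have := ih cs (vs ++ [x]) hc (by intro y hy; rcases List.mem_append.1 hy with h | h
                                       · exact hv y h
                                       · simp at h; simpa [h] using hx)
      simpa [List.filter_cons, hx, List.append_assoc] using this
    · have hx' : key x = false := by simpa using hx
      simp only [List.foldl_cons, pv_insertBy_false key x hx' cs vs hc hv]
      have := ih (cs ++ [x]) vs (by intro y hy; rcases List.mem_append.1 hy with h | h
                                    · exact hc y h
                                    · simp at h; simpa [h] using hx') hv
      simpa [List.filter_cons, hx', List.append_assoc] using this

-- Python's stable sort on the Bool key  ch in "aeiou"  is exactly "consonants then vowels"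
theorem pv_sorted_bool {α : Type} (key : α → Bool) (xs : List α) :
    PySem.List.sorted xs key false = xs.filter (fun a => !key a) ++ xs.filter (fun a => key a) := by
  rw [PySem.List.sorted_eq_foldl_insertBy]
  simpa using pv_sorted_bool_aux key xs [] [] (by simp) (by simp)

-- A's two-accumulator pass collects the vowels and the consonants in order
theorem pv_pairfold (xs : List Char) :
    ∀ (v0 c0 : List Char),
      xs.foldl (fun (vc : List Char × List Char) j =>
          if pvIsVowel j then (vc.1 ++ [j], vc.2) else (vc.1, vc.2 ++ [j])) (v0, c0)
        = (v0 ++ xs.filter (fun j => pvIsVowel j), c0 ++ xs.filter (fun j => !pvIsVowel j)) := by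
  induction xs with
  | nil => intro v0 c0; simp
  | cons x xs' ih =>
    intro v0 c0
    by_cases hx : pvIsVowel x = true
    · simp [hx, ih, List.append_assoc]
    · have hx' : pvIsVowel x = false := by simpa using hx
      simp [hx', ih, List.append_assoc]

theorem pv_isspace_space : PySem.Chars.isspace ' ' = true := by decide

theorem pv_rstrip_space (v : List Char) :
    PySem.Chars.rstrip (v ++ [' ']) = PySem.Chars.rstrip v := by
  simp [PySem.Chars.rstrip, pv_isspace_space]

theorem pv_strip_space (u : List Char) :
    PySem.Chars.strip (u ++ [' ']) = PySem.Chars.strip u := by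
  simp only [PySem.Chars.strip, PySem.Chars.lstrip, List.dropWhile_append]
  by_cases h : (List.dropWhile PySem.Chars.isspace u).isEmpty
  · simp [pv_isspace_space, PySem.Chars.rstrip, List.isEmpty_iff.1 h]
  · simp [h, pv_rstrip_space]

-- flatMap with trailing spaces vs " ".join, on a nonempty list of parts
theorem pv_flat_cons (p : List Char) (ts : List (List Char)) :
    (p :: ts).flatMap (fun q => q ++ [' ']) = PySem.Chars.join [' '] (p :: ts) ++ [' '] := by
  induction ts generalizing p with
  | nil => simp [PySem.Chars.join_singleton]
  | cons q ts' ih =>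
    rw [PySem.Chars.join_cons_cons]
    simp only [List.flatMap_cons] at ih ⊢
    rw [ih q]
    simp [List.append_assoc]

-- joining with trailing spaces then stripping = " ".join then stripping
theorem pv_strip_flat_join (ts : List (List Char)) :
    PySem.Chars.strip (ts.flatMap (fun p => p ++ [' ']))
      = PySem.Chars.strip (PySem.Chars.join [' '] ts) := by
  cases ts with
  | nil => simp [PySem.Chars.join_nil]
  | cons p rest => rw [pv_flat_cons, pv_strip_space]

theorem pv_main (sentence : String) :
    encrypt_sentence sentence = encrypt_sentence_alt sentence := by
  unfold encrypt_sentence encrypt_sentence_alt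
  rw [PySem.List.enumerate_eq_map_pyRange (PySem.Chars.splitOn sentence.toList [' ']) []]
  rw [List.map_map]
  simp only [PySem.List.len]
  congr 1
  rw [show (fun (s : List Char) (i : Int) =>
        let word := PySem.List.pyGetD (PySem.Chars.splitOn sentence.toList [' ']) i []
        if PySem.Int.mod i 2 == 0 then
          s ++ ((PySem.List.slice? word none none (-1)).getD []) ++ [' ']
        else
          let vc := word.foldl (fun (vc : List Char × List Char) j =>
            if pvIsVowel j then (vc.1 ++ [j], vc.2) else (vc.1, vc.2 ++ [j])) ([], [])
          s ++ vc.2 ++ vc.1 ++ [' '])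
      = (fun (s : List Char) (i : Int) =>
          s ++ (((fun p : Int × List Char =>
            if PySem.Int.mod p.1 2 == 0 then p.2.reverse
            else PySem.List.sorted p.2 (fun ch => pvIsVowel ch) false) ∘
              (fun j => (j, PySem.List.pyGetD (PySem.Chars.splitOn sentence.toList [' ']) j []))) i ++ [' '])) from ?_]
  · rw [PySem.List.foldl_append_eq_flatMap]
    simp only [List.nil_append]
    rw [← pv_strip_flat_join]
    congr 1
    have hFM := List.flatMap_map
      ((fun p : Int × List Char =>
          if PySem.Int.mod p.1 2 == 0 then p.2.reverse
          else PySem.List.sorted p.2 (fun ch => pvIsVowel ch) false) ∘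
        (fun j : Int => (j, PySem.List.pyGetD (PySem.Chars.splitOn sentence.toList [' ']) j [])))
      (fun p : List Char => p ++ [' '])
      (PySem.List.pyRange 0 ((PySem.Chars.splitOn sentence.toList [' ']).length : Int))
    exact hFM.symm
  · funext s i
    simp only [PySem.List.slice?_none_none_neg_one, Option.getD_some, pv_pairfold,
      Function.comp_apply]
    by_cases h2 : (2 : Int) ∣ i
    · simp [h2, List.append_assoc]
    · simp [h2, pv_sorted_bool, List.append_assoc]

-- ===== VERDICT (by name: the statement is the Claim_ definition above) =====
theorem encrypt_sentence_spec : Claim_equal_encrypt_sentence := by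
  intro sentence _
  exact pv_main sentence
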